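-- pv_equiv track=rewrite | github.com/martintufte/rubiks-cube | streamlit_app.py | count_length
-- ===== SOURCE A (Python) =====
-- def count_length(sequence, count_rotations=False, metric="HTM"):
--     """Count the length of a sequence."""
--     sequence = sequence.replace("(", "").replace(")", "").strip()
--
--     sum_rotations = sum(1 for char in sequence if char in "xyz")
--     sum_slices = sum(1 for char in sequence if char in "MES")
--     sum_double_moves = sum(1 for char in sequence if char in "2")
--     sum_moves = len(sequence.split())
--
--     if not count_rotations:
--         sum_moves -= sum_rotations
--
--     if metric == "HTM":
--         return sum_moves + sum_slices
--     elif metric == "STM":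
--         return sum_moves
--     elif metric == "QTM":
--         return sum_moves + sum_double_moves
--     raise ValueError(f"Invalid metric: {metric}")
-- ===== SOURCE B (Python) =====
-- def count_length(sequence, count_rotations=False, metric="HTM"):
--     """Count the length of a sequence (single-pass state machine, no intermediate strings)."""
--     rotations = slices = doubles = moves = 0
--     in_word = False
--     for c in sequence:
--         if c.isspace():
--             in_word = False
--         elif c == "(" or c == ")":
--             pass  # parentheses are transparent: deleted by A's cleaning step
--         else:
--             if not in_word:
--                 moves += 1
--                 in_word = True
--             if c in "xyz":
--                 rotations += 1
--             elif c in "MES":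
--                 slices += 1
--             elif c == "2":
--                 doubles += 1
--
--     if not count_rotations:
--         moves -= rotations
--
--     if metric == "HTM":
--         return moves + slices
--     elif metric == "STM":
--         return moves
--     elif metric == "QTM":
--         return moves + doubles
--     raise ValueError(f"Invalid metric: {metric}")
-- ===== Notes on version B (the rewrite author's own statement) =====
-- stated objective: alternative
-- what changed: Replaces A's pipeline of intermediate strings (two replace passes, strip, a split plus three generator scans) by a single left-to-right state machine over the raw string that counts words via an in-word flag, treats parentheses as transparent, and tallies the three character classes in the same pass.
import Mathlib
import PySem

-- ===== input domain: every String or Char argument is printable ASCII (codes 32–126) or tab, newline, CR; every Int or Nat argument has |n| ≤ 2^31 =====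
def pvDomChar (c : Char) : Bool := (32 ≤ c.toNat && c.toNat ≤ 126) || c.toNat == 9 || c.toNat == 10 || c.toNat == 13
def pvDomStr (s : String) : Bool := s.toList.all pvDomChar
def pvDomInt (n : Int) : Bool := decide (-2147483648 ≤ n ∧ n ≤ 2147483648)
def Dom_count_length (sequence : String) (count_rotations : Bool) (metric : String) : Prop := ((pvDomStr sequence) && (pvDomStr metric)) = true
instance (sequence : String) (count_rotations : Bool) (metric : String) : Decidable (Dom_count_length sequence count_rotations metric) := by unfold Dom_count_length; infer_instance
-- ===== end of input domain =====

-- B replaces A's intermediate-string pipeline (replace/replace/strip/split + three scans) by one single-pass state machine; same return value (alternative decomposition, same cost).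


-- ===== PORT A =====
-- 'char in "xyz"' etc. are char-membership tests; ported exact on every input
def count_length (sequence : String) (count_rotations : Bool) (metric : String) : Int :=
  let cs := PySem.Chars.strip
    (PySem.Chars.replace (PySem.Chars.replace sequence.toList "(".toList "".toList) ")".toList "".toList)
  let sum_rotations : Int := (cs.countP (fun c => c == 'x' || c == 'y' || c == 'z') : Nat)
  let sum_slices : Int := (cs.countP (fun c => c == 'M' || c == 'E' || c == 'S') : Nat)
  let sum_double_moves : Int := (cs.countP (fun c => c == '2') : Nat)
  let sum_moves : Int := ((PySem.Chars.split₀ cs).length : Nat)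
  let sum_moves := if !count_rotations then sum_moves - sum_rotations else sum_moves
  if metric = "HTM" then sum_moves + sum_slices
  else if metric = "STM" then sum_moves
  else if metric = "QTM" then sum_moves + sum_double_moves
  else 0  -- Python raises ValueError here; excluded by Pre_count_length

-- ===== PORT B =====
-- one step of Source B's loop: state = (rotations, slices, doubles, moves, in_word)
def pvStep (st : Int × Int × Int × Int × Bool) (c : Char) : Int × Int × Int × Int × Bool :=
  if PySem.Chars.isspace c then (st.1, st.2.1, st.2.2.1, st.2.2.2.1, false)
  else if c == '(' || c == ')' then st
  else
    let m := if !st.2.2.2.2 then st.2.2.2.1 + 1 else st.2.2.2.1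
    if c == 'x' || c == 'y' || c == 'z' then (st.1 + 1, st.2.1, st.2.2.1, m, true)
    else if c == 'M' || c == 'E' || c == 'S' then (st.1, st.2.1 + 1, st.2.2.1, m, true)
    else if c == '2' then (st.1, st.2.1, st.2.2.1 + 1, m, true)
    else (st.1, st.2.1, st.2.2.1, m, true)

def count_length_alt (sequence : String) (count_rotations : Bool) (metric : String) : Int :=
  let st := sequence.toList.foldl pvStep (0, 0, 0, 0, false)
  let moves := if !count_rotations then st.2.2.2.1 - st.1 else st.2.2.2.1
  if metric = "HTM" then moves + st.2.1
  else if metric = "STM" then moves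
  else if metric = "QTM" then moves + st.2.2.1
  else 0  -- Python raises ValueError here; excluded by Pre_count_length

-- ===== PRECONDITION & SPEC =====
-- Pre_ excludes exactly the metrics on which both Pythons raise ValueError.
def Pre_count_length (sequence : String) (count_rotations : Bool) (metric : String) : Prop :=
  metric = "HTM" ∨ metric = "STM" ∨ metric = "QTM"
instance (sequence : String) (count_rotations : Bool) (metric : String) : Decidable (Pre_count_length sequence count_rotations metric) := by unfold Pre_count_length; infer_instance
def pvWitness_count_length : String × Bool × String := ("(x) R U2 M", false, "HTM")
def Spec_count_length (sequence : String) (count_rotations : Bool) (metric : String) (out : Int) : Prop := out = count_length_alt sequence count_rotations metric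
instance (sequence : String) (count_rotations : Bool) (metric : String) (out : Int) : Decidable (Spec_count_length sequence count_rotations metric out) := by unfold Spec_count_length; infer_instance

-- ===== CLAIM =====
def Claim_equal_count_length : Prop := ∀ (sequence : String) (count_rotations : Bool) (metric : String), Dom_count_length sequence count_rotations metric → Pre_count_length sequence count_rotations metric → Spec_count_length sequence count_rotations metric (count_length sequence count_rotations metric)

-- ===== LEMMAS AND PROOFS =====

-- number of word starts in l when the machine begins with in-word flag inw (parentheses transparent)
def pvStarts : List Char → Bool → Nat
  | [], _ => 0
  | c :: t, inw =>
    if PySem.Chars.isspace c then pvStarts t false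
    else if c == '(' || c == ')' then pvStarts t inw
    else (if inw then 0 else 1) + pvStarts t true
-- final in-word flag after l
def pvInw : List Char → Bool → Bool
  | [], inw => inw
  | c :: t, inw =>
    if PySem.Chars.isspace c then pvInw t false
    else if c == '(' || c == ')' then pvInw t inw
    else pvInw t true

-- a whitespace char or a parenthesis is none of the counted move characters
lemma pv_notcount {c : Char}
    (h : PySem.Chars.isspace c = true ∨ (c == '(' || c == ')') = true) :
    (c == 'x' || c == 'y' || c == 'z') = false ∧ (c == 'M' || c == 'E' || c == 'S') = false ∧
      (c == '2') = false := by
  refine ⟨?_, ?_, ?_⟩ <;>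
  · simp only [Bool.or_eq_false_iff, beq_eq_false_iff_ne]
    repeat' apply And.intro
    all_goals
      rintro rfl
      rcases h with h | h <;> revert h <;> decide
-- B's fold computes the three class counts, the word-start count and the final flag
lemma foldl_pvStep (l : List Char) (r s d m : Int) (inw : Bool) :
    l.foldl pvStep (r, s, d, m, inw) =
      (r + (l.countP (fun c => c == 'x' || c == 'y' || c == 'z') : Nat),
       s + (l.countP (fun c => c == 'M' || c == 'E' || c == 'S') : Nat),
       d + (l.countP (fun c => c == '2') : Nat),
       m + (pvStarts l inw : Nat), pvInw l inw) := by
  induction l generalizing r s d m inw with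
  | nil => simp [pvStarts, pvInw]
  | cons c t ih =>
    by_cases hsp : PySem.Chars.isspace c = true
    · obtain ⟨h1, h2, h3⟩ := pv_notcount (Or.inl hsp)
      simp [pvStep, pvStarts, pvInw, hsp, h1, h2, h3, List.countP_cons, ih]
    · by_cases hpar : (c == '(' || c == ')') = true
      · obtain ⟨h1, h2, h3⟩ := pv_notcount (Or.inr hpar)
        simp [pvStep, pvStarts, pvInw, hsp, hpar, h1, h2, h3, List.countP_cons, ih]
      · simp only [List.foldl_cons, pvStep, hsp, hpar, if_false, Bool.if_false_left]
        rw [pvStarts, pvInw]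
        have disj : ∀ d : Char, (d == 'x' || d == 'y' || d == 'z') = true →
            (d == 'M' || d == 'E' || d == 'S') = false ∧ (d == '2') = false := by
          intro d hd
          simp only [Bool.or_eq_true, beq_iff_eq] at hd
          rcases hd with (rfl | rfl) | rfl <;> exact ⟨by decide, by decide⟩
        have disj2 : ∀ d : Char, (d == 'M' || d == 'E' || d == 'S') = true → (d == '2') = false := by
          intro d hd
          simp only [Bool.or_eq_true, beq_iff_eq] at hd
          rcases hd with (rfl | rfl) | rfl <;> decide
        have hpar' : ¬(c = '(' ∨ c = ')') := by simpa using hpar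
        by_cases h1 : (c == 'x' || c == 'y' || c == 'z') = true
        · obtain ⟨h2, h3⟩ := disj c h1
          cases inw <;> simp [List.countP_cons, h1, h2, h3, hsp, hpar', ih] <;> omega
        · by_cases h2 : (c == 'M' || c == 'E' || c == 'S') = true
          · have h3 := disj2 c h2
            cases inw <;> simp [List.countP_cons, h1, h2, h3, hsp, hpar', ih] <;> omega
          · by_cases h3 : (c == '2') = true
            · cases inw <;> simp [List.countP_cons, h1, h2, h3, hsp, hpar', ih] <;> omega
            · cases inw <;> simp [List.countP_cons, h1, h2, h3, hsp, hpar', ih] <;> omega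
-- replacing a single character by the empty string is filtering it out
lemma replace_go_single (a : Char) (l acc : List Char) (fuel : Nat) (h : l.length ≤ fuel) :
    PySem.Chars.replace.go [a] [] fuel l acc = acc.reverse ++ l.filter (fun c => !(c == a)) := by
  induction l generalizing fuel acc with
  | nil => cases fuel <;> simp [PySem.Chars.replace.go]
  | cons c t ih =>
    cases fuel with
    | zero => simp at h
    | succ f =>
      rw [PySem.Chars.replace.go]
      by_cases hc : a = c
      · subst hc
        simp only [List.isPrefixOf, BEq.rfl, Bool.true_and, List.isPrefixOf_nil_left, if_true,
          List.length_singleton, List.drop_one, List.tail_cons, List.reverse_nil, List.nil_append]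
        rw [ih _ _ (by simpa using Nat.le_of_succ_le_succ h)]
        simp
      · have hpre : [a].isPrefixOf (c :: t) = false := by
          simp [List.isPrefixOf, hc]
        simp only [hpre, Bool.false_eq_true, if_false]
        rw [ih _ _ (by simpa using Nat.le_of_succ_le_succ h)]
        simp [Ne.symm hc, hc]
lemma replace_single (l : List Char) (a : Char) :
    PySem.Chars.replace l [a] [] = l.filter (fun c => !(c == a)) := by
  rw [PySem.Chars.replace]
  simp [replace_go_single a l [] l.length le_rfl]
lemma countP_filter_of_imp (p q : Char → Bool) (h : ∀ a, p a = true → q a = true)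
    (l : List Char) : (l.filter q).countP p = l.countP p := by
  induction l with
  | nil => rfl
  | cons c t ih =>
    by_cases hq : q c = true
    · simp [List.filter_cons, hq, List.countP_cons, ih]
    · have hp : p c = false := by
        cases hpc : p c
        · rfl
        · exact absurd (h c hpc) hq
      simp [List.filter_cons, hq, List.countP_cons, hp, ih]
lemma countP_dropWhile_space (p : Char → Bool) (h : ∀ c, PySem.Chars.isspace c = true → p c = false)
    (l : List Char) : (l.dropWhile PySem.Chars.isspace).countP p = l.countP p := by
  induction l with
  | nil => rfl
  | cons c t ih =>
    by_cases hs : PySem.Chars.isspace c = true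
    · simp [List.dropWhile_cons, hs, List.countP_cons, h c hs, ih]
    · simp [List.dropWhile_cons, hs]
lemma countP_strip (p : Char → Bool) (h : ∀ c, PySem.Chars.isspace c = true → p c = false)
    (l : List Char) : (PySem.Chars.strip l).countP p = l.countP p := by
  rw [PySem.Chars.strip, PySem.Chars.rstrip, PySem.Chars.lstrip]
  rw [List.countP_reverse, countP_dropWhile_space p h, List.countP_reverse,
      countP_dropWhile_space p h]

lemma pvStarts_spaces (sp : List Char) (h : ∀ c ∈ sp, PySem.Chars.isspace c = true) (inw : Bool) :
    pvStarts sp inw = 0 := by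
  induction sp generalizing inw with
  | nil => rfl
  | cons c t ih =>
    rw [pvStarts]
    simp [h c (List.mem_cons_self ..), ih (fun x hx => h x (List.mem_cons_of_mem _ hx)) _]
lemma pvStarts_append_spaces (l sp : List Char) (h : ∀ c ∈ sp, PySem.Chars.isspace c = true)
    (inw : Bool) : pvStarts (l ++ sp) inw = pvStarts l inw := by
  induction l generalizing inw with
  | nil => simpa using pvStarts_spaces sp h inw
  | cons c t ih => rw [List.cons_append, pvStarts, pvStarts]; split_ifs <;> simp [ih]
lemma pvStarts_lstrip (l : List Char) :
    pvStarts (l.dropWhile PySem.Chars.isspace) false = pvStarts l false := by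
  induction l with
  | nil => rfl
  | cons c t ih =>
    by_cases hs : PySem.Chars.isspace c = true
    · rw [List.dropWhile_cons_of_pos hs, ih, pvStarts]; simp [hs]
    · rw [List.dropWhile_cons_of_neg (by simp [hs])]
lemma pvStarts_strip (l : List Char) :
    pvStarts (PySem.Chars.strip l) false = pvStarts l false := by
  rw [PySem.Chars.strip, PySem.Chars.rstrip, ← pvStarts_lstrip l]
  set l' := l.dropWhile PySem.Chars.isspace with hl'
  have hsplit : l' = (l'.reverse.dropWhile PySem.Chars.isspace).reverse ++
      (l'.reverse.takeWhile PySem.Chars.isspace).reverse := by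
    rw [← List.reverse_append, List.takeWhile_append_dropWhile, List.reverse_reverse]
  conv_rhs => rw [hsplit]
  rw [pvStarts_append_spaces _ _ (fun c hc => List.mem_takeWhile_imp (List.mem_reverse.mp hc))]
  simp only [PySem.Chars.lstrip, ← hl']
lemma pvStarts_filter_paren (a : Char) (hsp : PySem.Chars.isspace a = false)
    (hpar : (a == '(' || a == ')') = true) (l : List Char) (inw : Bool) :
    pvStarts (l.filter (fun c => !(c == a))) inw = pvStarts l inw := by
  induction l generalizing inw with
  | nil => rfl
  | cons c t ih =>
    by_cases hc : c = a
    · subst hc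
      rw [List.filter_cons_of_neg (by simp), pvStarts]
      simp [hsp, hpar, ih]
    · rw [List.filter_cons_of_pos (by simp [hc]), pvStarts, pvStarts]
      split_ifs <;> simp [ih]
lemma split₀_go_length (l : List Char) (hnp : ∀ c ∈ l, (c == '(' || c == ')') = false)
    (cur : List Char) (acc : List (List Char)) :
    (PySem.Chars.split₀.go l cur acc).length =
      acc.length + (if cur.isEmpty then 0 else 1) + pvStarts l (!cur.isEmpty) := by
  induction l generalizing cur acc with
  | nil =>
    rw [PySem.Chars.split₀.go]
    by_cases hc : cur.isEmpty <;> simp [hc, pvStarts]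
  | cons c t ih =>
    have hnpt : ∀ x ∈ t, (x == '(' || x == ')') = false :=
      fun x hx => hnp x (List.mem_cons_of_mem _ hx)
    have hnpc := hnp c (List.mem_cons_self ..)
    rw [PySem.Chars.split₀.go]
    by_cases hs : PySem.Chars.isspace c = true
    · rw [if_pos hs]
      by_cases hc : cur.isEmpty
      · rw [if_pos hc, ih hnpt, pvStarts]
        simp [hs, hc, pvStarts]
      · rw [if_neg hc, ih hnpt, pvStarts]
        simp [hs, hc, pvStarts]
    · rw [if_neg hs, ih hnpt, pvStarts]
      simp only [hs, hnpc, Bool.false_eq_true, if_false]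
      by_cases hc : cur.isEmpty <;> simp [hc] <;> omega
lemma split₀_length (l : List Char) (hnp : ∀ c ∈ l, (c == '(' || c == ')') = false) :
    (PySem.Chars.split₀ l).length = pvStarts l false := by
  rw [PySem.Chars.split₀, split₀_go_length l hnp [] []]
  simp

lemma mem_strip {c : Char} {l : List Char} (h : c ∈ PySem.Chars.strip l) : c ∈ l := by
  rw [PySem.Chars.strip, PySem.Chars.rstrip, PySem.Chars.lstrip] at h
  rw [List.mem_reverse] at h
  have h2 := (List.dropWhile_sublist _).subset h
  rw [List.mem_reverse] at h2
  exact (List.dropWhile_sublist _).subset h2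

-- ===== VERDICT =====
theorem count_length_spec : Claim_equal_count_length := by
  intro sequence count_rotations metric _ _
  unfold Spec_count_length count_length count_length_alt
  have e1 : "(".toList = ['('] := rfl
  have e2 : ")".toList = [')'] := rfl
  have e0 : "".toList = ([] : List Char) := rfl
  simp only [e1, e2, e0, replace_single, foldl_pvStep, zero_add]
  set cs := sequence.toList with hcs
  set f1 := cs.filter (fun c => !(c == '(')) with hf1
  set f2 := f1.filter (fun c => !(c == ')')) with hf2
  have hmem : ∀ c ∈ PySem.Chars.strip f2, (c == '(' || c == ')') = false := by
    intro c hc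
    have h2 := mem_strip hc
    rw [hf2, List.mem_filter] at h2
    obtain ⟨h1, hp2⟩ := h2
    rw [hf1, List.mem_filter] at h1
    obtain ⟨_, hp1⟩ := h1
    simp only [Bool.not_eq_eq_eq_not, Bool.not_true] at hp1 hp2
    simp [hp1, hp2]
  have hxyz : (PySem.Chars.strip f2).countP (fun c => c == 'x' || c == 'y' || c == 'z') =
      cs.countP (fun c => c == 'x' || c == 'y' || c == 'z') := by
    rw [countP_strip _ (fun c hc => (pv_notcount (Or.inl hc)).1), hf2, hf1,
        countP_filter_of_imp, countP_filter_of_imp] <;>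
    · intro a ha
      simp only [Bool.or_eq_true, beq_iff_eq] at ha
      rcases ha with (rfl | rfl) | rfl <;> decide
  have hmes : (PySem.Chars.strip f2).countP (fun c => c == 'M' || c == 'E' || c == 'S') =
      cs.countP (fun c => c == 'M' || c == 'E' || c == 'S') := by
    rw [countP_strip _ (fun c hc => (pv_notcount (Or.inl hc)).2.1), hf2, hf1,
        countP_filter_of_imp, countP_filter_of_imp] <;>
    · intro a ha
      simp only [Bool.or_eq_true, beq_iff_eq] at ha
      rcases ha with (rfl | rfl) | rfl <;> decide
  have h2c : (PySem.Chars.strip f2).countP (fun c => c == '2') =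
      cs.countP (fun c => c == '2') := by
    rw [countP_strip _ (fun c hc => (pv_notcount (Or.inl hc)).2.2), hf2, hf1,
        countP_filter_of_imp, countP_filter_of_imp] <;>
    · intro a ha
      simp only [beq_iff_eq] at ha
      subst ha; decide
  have hmov : (PySem.Chars.split₀ (PySem.Chars.strip f2)).length = pvStarts cs false := by
    rw [split₀_length _ hmem, pvStarts_strip, hf2,
        pvStarts_filter_paren ')' (by decide) (by decide), hf1,
        pvStarts_filter_paren '(' (by decide) (by decide)]
  rw [hxyz, hmes, h2c, hmov]
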